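-- pv_equiv track=rewrite | github.com/AlexTuisov/HW3 | HW3_submission/3_submission/ex3.py | possible_actions
-- ===== SOURCE A (Python) =====
-- def check_limits(state, x, y):
--     if 0 <= x < len(state):
--         if 0 <= y < len(state[0]):
--             return True
--     return False
--
-- def tile_is_infected(state, x, y):
--     # possible directions for infection (right, left, down, up)
--     dircs = [(0, 1), (0, -1), (1, 0), (-1, 0)]
--     for direction in dircs:
--         x1 = x + direction[0]
--         y1 = y + direction[1]
--         if check_limits(state, x1, y1):
--             if state[x1][y1][0] == 'S':
--                 return True
--     return False
--
-- def possible_actions(state, zone_of_control):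
--     police_actions = []
--     medics_actions = []
--     for tile in zone_of_control:
--         x = tile[0]
--         y = tile[1]
--         if state[x][y][0] == 'S':
--             police_actions.append(('quarantine', (x, y)))
--         if state[x][y] == 'H' and tile_is_infected(state, x, y):
--             medics_actions.append(('vaccinate', (x, y)))
--     return police_actions, medics_actions
-- ===== SOURCE B (Python) =====
-- def possible_actions(state, zone_of_control):
--     # Scan the grid once for sick tiles, index their 4-neighborhoods as an
--     # 'exposed' set, then build both action lists by single passes over the zone.
--     sick = [(i, j) for i, row in enumerate(state)
--             for j, cell in enumerate(row) if cell[0] == 'S']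
--     exposed = {(i + dx, j + dy) for i, j in sick
--                for dx, dy in ((0, 1), (0, -1), (1, 0), (-1, 0))}
--     police_actions = [('quarantine', (x, y)) for x, y in zone_of_control
--                       if state[x][y][0] == 'S']
--     medics_actions = [('vaccinate', (x, y)) for x, y in zone_of_control
--                       if state[x][y] == 'H' and (x, y) in exposed]
--     return police_actions, medics_actions
-- ===== Notes on version B (the rewrite author's own statement) =====
-- stated objective: alternative
-- what changed: Instead of probing the 4 neighbours of every zone tile, B scans the grid once for sick tiles, indexes their 4-neighbourhoods as an 'exposed' set, and then builds each action list by a single filtering pass over the zone.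
-- outside the precondition, e.g. on possible_actions([['', 'H']], []): A returns ([], []), B raises IndexError
import Mathlib
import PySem

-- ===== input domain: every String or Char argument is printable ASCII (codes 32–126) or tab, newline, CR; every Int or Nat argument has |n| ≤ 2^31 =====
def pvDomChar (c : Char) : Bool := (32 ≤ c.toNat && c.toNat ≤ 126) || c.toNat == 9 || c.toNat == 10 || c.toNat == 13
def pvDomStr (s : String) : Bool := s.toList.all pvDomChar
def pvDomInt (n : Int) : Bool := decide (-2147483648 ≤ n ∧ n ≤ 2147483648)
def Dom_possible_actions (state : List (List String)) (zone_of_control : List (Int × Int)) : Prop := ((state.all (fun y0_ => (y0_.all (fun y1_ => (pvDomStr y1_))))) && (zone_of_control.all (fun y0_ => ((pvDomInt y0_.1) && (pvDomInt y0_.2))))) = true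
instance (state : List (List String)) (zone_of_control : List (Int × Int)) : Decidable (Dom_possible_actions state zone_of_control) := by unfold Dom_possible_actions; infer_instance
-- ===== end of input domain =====

-- B replaces A's per-tile 4-neighbour probing by one grid scan that indexes the
-- neighbourhoods of all sick tiles as a set, then single filtering passes over the
-- zone (objective: alternative decomposition, same asymptotic cost here).

-- ===== PORT A =====
-- state[x][y] (Python indexing, negative wrap; "" only where Python would raise — excluded by Pre_)
def pyCell (state : List (List String)) (x y : Int) : String :=
  match PySem.List.pyGet? state x with
  | none => ""
  | some row => (PySem.List.pyGet? row y).getD ""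

def check_limits (state : List (List String)) (x y : Int) : Bool :=
  if 0 ≤ x ∧ x < (state.length : Int) then
    if 0 ≤ y ∧ y < ((state.headD []).length : Int) then true
    else false
  else false

def tile_is_infected (state : List (List String)) (x y : Int) : Bool :=
  [((0:Int), (1:Int)), (0, -1), (1, 0), (-1, 0)].any fun d =>
    check_limits state (x + d.1) (y + d.2) &&
      (PySem.Str.pyGet? (pyCell state (x + d.1) (y + d.2)) 0 == some 'S')

def possible_actions (state : List (List String)) (zone_of_control : List (Int × Int)) :
    (List (String × (Int × Int))) × (List (String × (Int × Int))) :=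
  zone_of_control.foldl
    (fun acc tile =>
      let x := tile.1
      let y := tile.2
      let acc :=
        if PySem.Str.pyGet? (pyCell state x y) 0 == some 'S' then
          (acc.1 ++ [("quarantine", (x, y))], acc.2)
        else acc
      if pyCell state x y == "H" && tile_is_infected state x y then
        (acc.1, acc.2 ++ [("vaccinate", (x, y))])
      else acc)
    ([], [])

-- ===== PORT B =====
def sick_tiles (state : List (List String)) : List (Int × Int) :=
  (PySem.List.enumerate state).flatMap fun ir =>
    ((PySem.List.enumerate ir.2).filter fun jc =>
        PySem.Str.pyGet? jc.2 0 == some 'S').map fun jc => (ir.1, jc.1)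

def exposed_set (state : List (List String)) : PySem.Set (Int × Int) :=
  PySem.Set.ofList ((sick_tiles state).flatMap fun p =>
    [((0:Int), (1:Int)), (0, -1), (1, 0), (-1, 0)].map fun d => (p.1 + d.1, p.2 + d.2))

def possible_actions_alt (state : List (List String)) (zone_of_control : List (Int × Int)) :
    (List (String × (Int × Int))) × (List (String × (Int × Int))) :=
  ((zone_of_control.filter fun t =>
      PySem.Str.pyGet? (pyCell state t.1 t.2) 0 == some 'S').map fun t => ("quarantine", t),
   (zone_of_control.filter fun t =>
      pyCell state t.1 t.2 == "H" && PySem.Set.contains (exposed_set state) t).map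
     fun t => ("vaccinate", t))

-- ===== PRECONDITION & SPEC =====
-- Pre_ admits the natural domain: a rectangular grid of non-empty status strings and
-- zone tiles whose Python index (negative wrap included) lands inside the grid;
-- ragged grids and grids with an empty cell are excluded, where A either raises
-- (IndexError on a short row / str[0] of "") or its bounds check built from
-- len(state[0]) silently skips cells of longer rows.
def Pre_possible_actions (state : List (List String)) (zone_of_control : List (Int × Int)) : Prop :=
  (∀ row ∈ state, row.length = (state.headD []).length) ∧
  (∀ row ∈ state, ∀ c ∈ row, c ≠ "") ∧
  (∀ t ∈ zone_of_control,
    -(state.length : Int) ≤ t.1 ∧ t.1 < (state.length : Int) ∧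
    -((state.headD []).length : Int) ≤ t.2 ∧ t.2 < ((state.headD []).length : Int))

instance (state : List (List String)) (zone_of_control : List (Int × Int)) :
    Decidable (Pre_possible_actions state zone_of_control) := by
  unfold Pre_possible_actions; infer_instance

def pvWitness_possible_actions : List (List String) × (List (Int × Int)) :=
  ([["S", "H"], ["H", "Q"]], [(0, 0), (0, 1), (-1, -1)])

def Spec_possible_actions (state : List (List String)) (zone_of_control : List (Int × Int))
    (out : (List (String × (Int × Int))) × (List (String × (Int × Int)))) : Prop :=
  out = possible_actions_alt state zone_of_control

instance (state : List (List String)) (zone_of_control : List (Int × Int))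
    (out : (List (String × (Int × Int))) × (List (String × (Int × Int)))) :
    Decidable (Spec_possible_actions state zone_of_control out) := by
  unfold Spec_possible_actions; infer_instance

-- ===== CLAIM (what is proved, stated in full; the proofs are below) =====
def Claim_equal_possible_actions : Prop := ∀ (state : List (List String)) (zone_of_control : List (Int × Int)), Dom_possible_actions state zone_of_control → Pre_possible_actions state zone_of_control → Spec_possible_actions state zone_of_control (possible_actions state zone_of_control)

-- ===== LEMMAS AND PROOFS =====

-- membership in B's sick-tile index
theorem mem_sick_tiles (state : List (List String)) (p : Int × Int) :
    p ∈ sick_tiles state ↔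
      ∃ (k : Nat) (hk : k < state.length) (l : Nat) (hl : l < state[k].length),
        p = ((k : Int), (l : Int)) ∧ PySem.Str.pyGet? state[k][l] 0 = some 'S' := by
  unfold sick_tiles
  simp only [List.mem_flatMap, List.mem_map, List.mem_filter,
    PySem.List.mem_enumerate_iff]
  constructor
  · rintro ⟨ir, ⟨k, hk, rfl⟩, jc, ⟨⟨l, hl, rfl⟩, hS⟩, rfl⟩
    exact ⟨k, hk, l, hl, by simp, by simpa using hS⟩
  · rintro ⟨k, hk, l, hl, rfl, hS⟩
    exact ⟨(0 + (k : Int), state[k]), ⟨k, hk, rfl⟩,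
      ⟨(0 + (l : Int), state[k][l]), ⟨⟨l, hl, rfl⟩, by simpa using hS⟩, by simp⟩⟩

-- membership in B's exposed set
theorem contains_exposed (state : List (List String)) (x y : Int) :
    PySem.Set.contains (exposed_set state) (x, y) = true ↔
      ∃ q ∈ sick_tiles state,
        (x, y) = (q.1 + 1, q.2) ∨ (x, y) = (q.1 - 1, q.2) ∨
        (x, y) = (q.1, q.2 + 1) ∨ (x, y) = (q.1, q.2 - 1) := by
  unfold exposed_set
  simp only [PySem.Set.contains, List.contains_iff_exists_mem_beq, beq_iff_eq,
    PySem.Set.mem_ofList, List.mem_flatMap, List.mem_map]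
  constructor
  · rintro ⟨z, ⟨q, hq, d, hd, rfl⟩, hz⟩
    refine ⟨q, hq, ?_⟩
    fin_cases hd <;> simp only [Prod.mk.injEq] at hz ⊢ <;> omega
  · rintro ⟨q, hq, h⟩
    rcases h with h | h | h | h
    · exact ⟨(q.1 + 1, q.2), ⟨q, hq, (1, 0), by simp, by simp⟩, h⟩
    · exact ⟨(q.1 - 1, q.2), ⟨q, hq, (-1, 0), by simp, by simp; omega⟩, h⟩
    · exact ⟨(q.1, q.2 + 1), ⟨q, hq, (0, 1), by simp, by simp⟩, h⟩
    · exact ⟨(q.1, q.2 - 1), ⟨q, hq, (0, -1), by simp, by simp; omega⟩, h⟩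

-- Python indexing at nonnegative in-range positions
theorem pyCell_natCast (state : List (List String)) (k l : Nat)
    (hk : k < state.length) (hl : l < state[k].length) :
    pyCell state (k : Int) (l : Int) = state[k][l] := by
  unfold pyCell
  rw [PySem.List.pyGet?_natCast, List.getElem?_eq_getElem hk]
  show (PySem.List.pyGet? state[k] (l : Int)).getD "" = state[k][l]
  rw [PySem.List.pyGet?_natCast, List.getElem?_eq_getElem hl]
  rfl

-- an in-bounds probe of A reads the same character B's scan reads
theorem probe_eq_sick (state : List (List String)) (u v : Int)
    (hrect : ∀ row ∈ state, row.length = (state.headD []).length) :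
    (check_limits state u v &&
      (PySem.Str.pyGet? (pyCell state u v) 0 == some 'S')) = true ↔
    ∃ (k : Nat) (hk : k < state.length) (l : Nat) (hl : l < state[k].length),
      u = (k : Int) ∧ v = (l : Int) ∧ PySem.Str.pyGet? state[k][l] 0 = some 'S' := by
  constructor
  · intro h
    simp only [Bool.and_eq_true, check_limits, beq_iff_eq] at h
    obtain ⟨hcl, hS⟩ := h
    split_ifs at hcl with h1 h2
    · obtain ⟨hu0, hun⟩ := h1
      obtain ⟨hv0, hvm⟩ := h2
      have hk : u.toNat < state.length := by omega
      have hrow : state[u.toNat].length = (state.headD []).length :=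
        hrect _ (List.getElem_mem hk)
      have hl : v.toNat < state[u.toNat].length := by omega
      have hcell := pyCell_natCast state u.toNat v.toNat hk hl
      rw [show ((u.toNat : Nat) : Int) = u by omega,
        show ((v.toNat : Nat) : Int) = v by omega] at hcell
      exact ⟨u.toNat, hk, v.toNat, hl, by omega, by omega, by rw [← hcell]; exact hS⟩
  · rintro ⟨k, hk, l, hl, rfl, rfl, hS⟩
    have hrow : state[k].length = (state.headD []).length :=
      hrect _ (List.getElem_mem hk)
    have hlm : l < (state.headD []).length := hrow ▸ hl
    have hcell := pyCell_natCast state k l hk hl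
    simp only [Bool.and_eq_true, check_limits, beq_iff_eq, hcell, hS, and_true]
    rw [if_pos ⟨by omega, by exact_mod_cast hk⟩]
    rw [if_pos ⟨by omega, by exact_mod_cast hlm⟩]

-- the key reversal: A's neighbour probe equals B's exposed-set lookup
theorem infected_eq_contains (state : List (List String)) (x y : Int)
    (hrect : ∀ row ∈ state, row.length = (state.headD []).length) :
    tile_is_infected state x y = PySem.Set.contains (exposed_set state) (x, y) := by
  rw [Bool.eq_iff_iff]
  rw [contains_exposed]
  unfold tile_is_infected
  simp only [List.any_eq_true]
  constructor
  · rintro ⟨d, hd, hprobe⟩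
    obtain ⟨k, hk, l, hl, hu, hv, hS⟩ := (probe_eq_sick state _ _ hrect).1 hprobe
    refine ⟨((k : Int), (l : Int)), (mem_sick_tiles state _).2 ⟨k, hk, l, hl, rfl, hS⟩, ?_⟩
    fin_cases hd <;> simp_all <;> omega
  · rintro ⟨q, hq, h⟩
    obtain ⟨k, hk, l, hl, rfl, hS⟩ := (mem_sick_tiles state q).1 hq
    have probe : ∀ u v : Int, u = (k : Int) → v = (l : Int) →
        (check_limits state u v &&
          (PySem.Str.pyGet? (pyCell state u v) 0 == some 'S')) = true := by
      intro u v hu hv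
      exact (probe_eq_sick state u v hrect).2 ⟨k, hk, l, hl, hu, hv, hS⟩
    rcases h with h | h | h | h <;>
      simp only [Prod.mk.injEq] at h
    · exact ⟨(-1, 0), by simp, probe _ _ (by omega) (by omega)⟩
    · exact ⟨(1, 0), by simp, probe _ _ (by omega) (by omega)⟩
    · exact ⟨(0, -1), by simp, probe _ _ (by omega) (by omega)⟩
    · exact ⟨(0, 1), by simp, probe _ _ (by omega) (by omega)⟩

-- A's zone fold, unrolled into the two filtered passes of B
theorem foldA_eq (state : List (List String)) (hrect : ∀ row ∈ state, row.length = (state.headD []).length) :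
    ∀ (zone : List (Int × Int)) (p m : List (String × (Int × Int))),
      zone.foldl
        (fun acc tile =>
          let x := tile.1
          let y := tile.2
          let acc :=
            if PySem.Str.pyGet? (pyCell state x y) 0 == some 'S' then
              (acc.1 ++ [("quarantine", (x, y))], acc.2)
            else acc
          if pyCell state x y == "H" && tile_is_infected state x y then
            (acc.1, acc.2 ++ [("vaccinate", (x, y))])
          else acc)
        (p, m) =
      (p ++ (zone.filter fun t =>
          PySem.Str.pyGet? (pyCell state t.1 t.2) 0 == some 'S').map
            (fun t => ("quarantine", t)),
       m ++ (zone.filter fun t =>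
          pyCell state t.1 t.2 == "H" &&
            PySem.Set.contains (exposed_set state) t).map
            (fun t => ("vaccinate", t))) := by
  intro zone
  induction zone with
  | nil => intro p m; simp
  | cons t zone ih =>
      intro p m
      rw [List.foldl_cons, List.filter_cons, List.filter_cons,
        ← infected_eq_contains state t.1 t.2 hrect]
      by_cases hS : (PySem.Str.pyGet? (pyCell state t.1 t.2) 0 == some 'S') = true <;>
        by_cases hH : (pyCell state t.1 t.2 == "H" && tile_is_infected state t.1 t.2) = true <;>
          simp only [hS, hH, if_true, if_false, Bool.false_eq_true] <;>
            rw [ih] <;> simp [List.append_assoc]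

-- ===== VERDICT (by name: the statement is the Claim_ definition above) =====
theorem possible_actions_spec : Claim_equal_possible_actions := by
  intro state zone _hdom hpre
  unfold Spec_possible_actions possible_actions possible_actions_alt
  rw [foldA_eq state hpre.1 zone [] []]
  simp
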